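-- pv_equiv track=rewrite | github.com/ggasam0/credit_loans | llm_standalone/run_llm_pipeline.py | _parse_bert_input
-- ===== SOURCE A (Python) =====
-- def _parse_bert_input(bert_input: str) -> tuple[dict[str, str], str]:
--     features: dict[str, str] = {}
--     desc_lines: list[str] = []
--     in_structured = False
--     in_desc = False
--     for raw_line in str(bert_input).splitlines():
--         line = raw_line.strip()
--         if line == "[Structured Risk Features]":
--             in_structured = True
--             in_desc = False
--             continue
--         if line == "[Borrower Description]":
--             in_desc = True
--             in_structured = False
--             continue
--         if in_structured and ":" in line:
--             key, value = line.split(":", 1)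
--             features[key.strip()] = value.strip()
--             continue
--         if in_desc:
--             desc_lines.append(line)
--     desc = " ".join([x for x in desc_lines if x and x.lower() != "null"]).strip()
--     return features, desc
-- ===== SOURCE B (Python) =====
-- def _parse_bert_input(bert_input):
--     # Segmentation algorithm: locate all header positions, then process each
--     # header-delimited slice as a block according to its opening header.
--     lines = [l.strip() for l in str(bert_input).splitlines()]
--     headers = {"[Structured Risk Features]": True, "[Borrower Description]": False}
--     cuts = [i for i, l in enumerate(lines) if l in headers]
--     cuts.append(len(lines))
--     features = {}
--     desc_parts = []
--     for start, end in zip(cuts, cuts[1:]):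
--         block = lines[start + 1:end]
--         if headers[lines[start]]:
--             for line in block:
--                 if ":" in line:
--                     k, v = line.split(":", 1)
--                     features[k.strip()] = v.strip()
--         else:
--             desc_parts += block
--     desc = " ".join(x for x in desc_parts if x and x.lower() != "null").strip()
--     return features, desc
-- ===== Notes on version B (the rewrite author's own statement) =====
-- stated objective: alternative
-- what changed: B replaces A's flag-driven line-by-line state machine with a segmentation algorithm: it first locates all header line indices via enumerate, appends a sentinel, zips consecutive cut points into (start,end) pairs, and processes each header-delimited slice as a whole block according to its opening header.
import Mathlib
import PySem

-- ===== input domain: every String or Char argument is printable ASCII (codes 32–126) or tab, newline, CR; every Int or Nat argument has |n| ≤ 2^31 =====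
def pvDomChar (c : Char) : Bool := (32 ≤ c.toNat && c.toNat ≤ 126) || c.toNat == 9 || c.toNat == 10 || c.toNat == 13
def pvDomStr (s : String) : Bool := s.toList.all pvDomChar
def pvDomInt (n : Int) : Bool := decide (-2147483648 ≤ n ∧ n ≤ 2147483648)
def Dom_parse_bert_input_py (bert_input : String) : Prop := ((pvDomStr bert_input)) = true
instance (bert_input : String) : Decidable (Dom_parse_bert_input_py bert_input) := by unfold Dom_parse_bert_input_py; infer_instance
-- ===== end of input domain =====

-- B replaces A's flag-driven line loop with a segmentation algorithm (find all header
-- indices, then process each header-delimited slice as a block); objective: alternative.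

-- ===== PORT A =====
-- loop body of A: state = (features, desc_lines, in_structured, in_desc)
def pvA_step (st : PySem.Dict String String × List String × Bool × Bool) (raw : String) :
    PySem.Dict String String × List String × Bool × Bool :=
  let line := PySem.Str.strip raw
  if line == "[Structured Risk Features]" then (st.1, st.2.1, true, false)
  else if line == "[Borrower Description]" then (st.1, st.2.1, false, true)
  else if st.2.2.1 && PySem.Str.isIn ":" line then
    match PySem.Str.splitMax? line ":" 1 with
    | some (key :: value :: _) =>
        (st.1.insert (PySem.Str.strip key) (PySem.Str.strip value), st.2.1, st.2.2.1, st.2.2.2)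
    | _ => st   -- unreachable: split(":",1) on a line containing ":" yields two pieces
  else if st.2.2.2 then (st.1, st.2.1 ++ [line], st.2.2.1, st.2.2.2)
  else st

def parse_bert_input_py (bert_input : String) : (List (String × String)) × String :=
  let st := (PySem.Str.splitlines bert_input).foldl pvA_step (PySem.Dict.empty, [], false, false)
  let desc := PySem.Str.strip (PySem.Str.join " "
    (st.2.1.filter (fun x => !(x == "") && !(PySem.Str.lower x == "null"))))
  (st.1.items, desc)

-- ===== PORT B =====
-- headers = {"[Structured Risk Features]": True, "[Borrower Description]": False}
def pvHeaders : PySem.Dict String Bool :=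
  (PySem.Dict.empty.insert "[Structured Risk Features]" true).insert "[Borrower Description]" false

-- inner loop over a structured block
def pvB_step (d : PySem.Dict String String) (line : String) : PySem.Dict String String :=
  if PySem.Str.isIn ":" line then
    match PySem.Str.splitMax? line ":" 1 with
    | some (key :: value :: _) => d.insert (PySem.Str.strip key) (PySem.Str.strip value)
    | _ => d   -- unreachable
  else d

-- body of B's loop over zip(cuts, cuts[1:]); state = (features, desc_parts)
def pvSegStep (lines : List String) (st : PySem.Dict String String × List String)
    (p : Int × Int) : PySem.Dict String String × List String :=
  let block := PySem.List.slice lines (some (p.1 + 1)) (some p.2)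
  -- headers[lines[start]]: start is a header index, so neither lookup can fail (.getD defaults are dead)
  if (pvHeaders.get? ((PySem.List.pyGet? lines p.1).getD "")).getD false then
    (block.foldl pvB_step st.1, st.2)
  else
    (st.1, st.2 ++ block)

def parse_bert_input_py_alt (bert_input : String) : (List (String × String)) × String :=
  let lines := (PySem.Str.splitlines bert_input).map PySem.Str.strip
  let cuts := ((PySem.List.enumerate lines).filter (fun p => pvHeaders.contains p.2)).map
      (fun p => p.1) ++ [(lines.length : Int)]
  let pairs := cuts.zip cuts.tail   -- zip(cuts, cuts[1:])
  let st := pairs.foldl (pvSegStep lines) (PySem.Dict.empty, [])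
  let desc := PySem.Str.strip (PySem.Str.join " "
    (st.2.filter (fun x => !(x == "") && !(PySem.Str.lower x == "null"))))
  (st.1.items, desc)

-- ===== PRECONDITION & SPEC =====
def Spec_parse_bert_input_py (bert_input : String) (out : (List (String × String)) × String) : Prop := out = parse_bert_input_py_alt bert_input
instance (bert_input : String) (out : (List (String × String)) × String) : Decidable (Spec_parse_bert_input_py bert_input out) := by unfold Spec_parse_bert_input_py; infer_instance

-- ===== CLAIM (what is proved, stated in full; the proofs are below) =====
def Claim_equal_parse_bert_input_py : Prop := ∀ (bert_input : String), Dom_parse_bert_input_py bert_input → Spec_parse_bert_input_py bert_input (parse_bert_input_py bert_input)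

-- ===== LEMMAS AND PROOFS =====

-- common characterization: route each (stripped) line to its section;
-- result = (structured lines, desc lines, current section)
def pvSfull (c : Option Bool) : List String → List String × List String × Option Bool
  | [] => ([], [], c)
  | l :: t =>
    if l == "[Structured Risk Features]" then pvSfull (some true) t
    else if l == "[Borrower Description]" then pvSfull (some false) t
    else match c with
      | none => pvSfull none t
      | some true =>
          let r := pvSfull (some true) t
          (l :: r.1, r.2.1, r.2.2)
      | some false =>
          let r := pvSfull (some false) t
          (r.1, l :: r.2.1, r.2.2)

def pvEnc (c : Option Bool) : Bool × Bool :=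
  match c with
  | none => (false, false)
  | some true => (true, false)
  | some false => (false, true)

-- ---- A-side: A's fold computes the pvSfull characterization ----
lemma pvLA (raws : List String) (d : PySem.Dict String String) (dl : List String)
    (c : Option Bool) :
    raws.foldl pvA_step (d, dl, pvEnc c) =
      ((pvSfull c (raws.map PySem.Str.strip)).1.foldl pvB_step d,
       dl ++ (pvSfull c (raws.map PySem.Str.strip)).2.1,
       pvEnc (pvSfull c (raws.map PySem.Str.strip)).2.2) := by
  induction raws generalizing d dl c with
  | nil => simp [pvSfull]
  | cons raw t ih =>
    simp only [List.foldl_cons, List.map_cons]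
    by_cases h1 : PySem.Str.strip raw == "[Structured Risk Features]"
    · have : pvA_step (d, dl, pvEnc c) raw = (d, dl, pvEnc (some true)) := by
        simp [pvA_step, h1, pvEnc]
      rw [this, ih]
      simp [pvSfull, h1]
    by_cases h2 : PySem.Str.strip raw == "[Borrower Description]"
    · have : pvA_step (d, dl, pvEnc c) raw = (d, dl, pvEnc (some false)) := by
        simp [pvA_step, h1, h2, pvEnc]
      rw [this, ih]
      simp [pvSfull, h1, h2]
    rcases c with _ | b
    · have : pvA_step (d, dl, pvEnc none) raw = (d, dl, pvEnc none) := by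
        simp [pvA_step, h1, h2, pvEnc]
      rw [this, ih]
      simp [pvSfull, h1, h2]
    · cases b
      · -- desc section
        have : pvA_step (d, dl, pvEnc (some false)) raw
            = (d, dl ++ [PySem.Str.strip raw], pvEnc (some false)) := by
          simp [pvA_step, h1, h2, pvEnc]
        rw [this, ih]
        simp [pvSfull, h1, h2, pvEnc]
      · -- structured section
        have h1' : (PySem.Str.strip raw == "[Structured Risk Features]") = false := by
          simpa using h1
        have h2' : (PySem.Str.strip raw == "[Borrower Description]") = false := by
          simpa using h2
        have hst : pvA_step (d, dl, pvEnc (some true)) raw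
            = (pvB_step d (PySem.Str.strip raw), dl, pvEnc (some true)) := by
          simp only [pvA_step, pvEnc, pvB_step, h1', h2', Bool.false_eq_true, if_false,
            Bool.true_and]
          cases hb : PySem.Str.isIn ":" (PySem.Str.strip raw) with
          | false => simp
          | true =>
            simp only [if_true]
            cases hsp : PySem.Str.splitMax? (PySem.Str.strip raw) ":" 1 with
            | none => rfl
            | some ps => rcases ps with _ | ⟨k, _ | ⟨v, r⟩⟩ <;> rfl
        rw [hst, ih]
        simp [pvSfull, h1, h2, pvEnc]

-- ---- B-side helpers: Nat-level cut positions and segment step ----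
def pvIsHdr (l : String) : Bool := pvHeaders.contains l

def pvNatCuts : List String → List Nat
  | [] => []
  | l :: t => if pvIsHdr l then 0 :: (pvNatCuts t).map (· + 1) else (pvNatCuts t).map (· + 1)

def pvNatSegStep (lines : List String) (st : PySem.Dict String String × List String)
    (p : Nat × Nat) : PySem.Dict String String × List String :=
  let block := (lines.drop (p.1 + 1)).take (p.2 - (p.1 + 1))
  if (pvHeaders.get? (lines.getD p.1 "")).getD false then
    (block.foldl pvB_step st.1, st.2)
  else
    (st.1, st.2 ++ block)

def pvNatFold (ls : List String) (st : PySem.Dict String String × List String) :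
    PySem.Dict String String × List String :=
  ((pvNatCuts ls ++ [ls.length]).zip ((pvNatCuts ls ++ [ls.length]).tail)).foldl
    (pvNatSegStep ls) st

lemma pvEnumCuts (t : List String) (s : Int) :
    ((PySem.List.enumerate t s).filter (fun p => pvHeaders.contains p.2)).map (fun p => p.1)
      = (pvNatCuts t).map (fun (n : Nat) => (n : Int) + s) := by
  induction t generalizing s with
  | nil => simp [PySem.List.enumerate_nil, pvNatCuts]
  | cons l t ih =>
    rw [PySem.List.enumerate_cons]
    cases h : pvIsHdr l with
    | true =>
      simp only [pvNatCuts, h, if_true, List.filter_cons,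
        show pvHeaders.contains l = true from h, if_true, List.map_cons, ih]
      congr 1
      · simp
      · rw [List.map_map]
        apply List.map_congr_left
        intro n _
        simp only [Function.comp_apply]
        push_cast
        ring
    | false =>
      simp only [pvNatCuts, h, List.filter_cons,
        show pvHeaders.contains l = false from h, Bool.false_eq_true, if_false, ih,
        List.map_map]
      apply List.map_congr_left
      intro n _
      simp only [Function.comp_apply]
      push_cast
      ring

-- bridge pvSegStep (Int pairs) to pvNatSegStep
lemma pvSegStep_natCast (lines : List String) (st : PySem.Dict String String × List String)
    (a b : Nat) :
    pvSegStep lines st ((a : Int), (b : Int)) = pvNatSegStep lines st (a, b) := by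
  unfold pvSegStep pvNatSegStep
  have hsl : PySem.List.slice lines (some ((a : Int) + 1)) (some (b : Int))
      = (lines.drop (a + 1)).take (b - (a + 1)) := by
    have : ((a : Int) + 1) = ((a + 1 : Nat) : Int) := by push_cast; ring
    rw [this, PySem.List.slice_natCast]
  rw [hsl]
  simp [PySem.List.pyGet?_natCast, List.getD_eq_getElem?_getD]

-- shifting a segment step across a cons
lemma pvNatSegStep_shift (l : String) (t : List String)
    (st : PySem.Dict String String × List String) (a b : Nat) :
    pvNatSegStep (l :: t) st (a + 1, b + 1) = pvNatSegStep t st (a, b) := by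
  unfold pvNatSegStep
  have h1 : (l :: t).drop (a + 1 + 1) = t.drop (a + 1) := rfl
  have h2 : b + 1 - (a + 1 + 1) = b - (a + 1) := by omega
  have h3 : (l :: t).getD (a + 1) "" = t.getD a "" := rfl
  rw [h1, h2, h3]

lemma pvZipTailMap {α β : Type} (f : α → β) (xs : List α) :
    (xs.map f).zip (xs.map f).tail = (xs.zip xs.tail).map (Prod.map f f) := by
  rw [← List.map_tail, List.zip_map]

-- first cut of t (or t.length if no header)
def pvC0 (t : List String) : Nat := (pvNatCuts t ++ [t.length]).headD 0

lemma pvC0_cons_nonhdr (l : String) (t : List String) (h : ¬ pvIsHdr l) :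
    pvC0 (l :: t) = pvC0 t + 1 := by
  unfold pvC0
  simp only [pvNatCuts, h]
  cases pvNatCuts t <;> simp [List.length_cons]

-- pvSfull from an open section h = prefix block (by section) ++ pvSfull from none
lemma pvSfull_open (t : List String) :
    ((pvSfull (some true) t).1 = t.take (pvC0 t) ++ (pvSfull none t).1 ∧
     (pvSfull (some true) t).2.1 = (pvSfull none t).2.1) ∧
    ((pvSfull (some false) t).1 = (pvSfull none t).1 ∧
     (pvSfull (some false) t).2.1 = t.take (pvC0 t) ++ (pvSfull none t).2.1) := by
  induction t with
  | nil => simp [pvSfull, pvC0, pvNatCuts]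
  | cons l t ih =>
    by_cases h1 : l == "[Structured Risk Features]"
    · have hc : pvC0 (l :: t) = 0 := by
        unfold pvC0
        simp [pvNatCuts, pvIsHdr, show pvHeaders.contains l = true from by
          have : l = "[Structured Risk Features]" := by simpa using h1
          subst this; decide]
      simp [pvSfull, h1, hc]
    by_cases h2 : l == "[Borrower Description]"
    · have hc : pvC0 (l :: t) = 0 := by
        unfold pvC0
        simp [pvNatCuts, pvIsHdr, show pvHeaders.contains l = true from by
          have : l = "[Borrower Description]" := by simpa using h2
          subst this; decide]
      simp [pvSfull, h1, h2, hc]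
    · have hh : ¬ pvIsHdr l := by
        have e1 : ¬ l = "[Structured Risk Features]" := by simpa using h1
        have e2 : ¬ l = "[Borrower Description]" := by simpa using h2
        simp only [pvIsHdr, pvHeaders, PySem.Dict.contains, PySem.Dict.insert,
          PySem.Dict.empty]
        simp
        exact ⟨fun e => e1 e.symm, fun e => e2 e.symm⟩
      have hc := pvC0_cons_nonhdr l t hh
      simp only [pvSfull, h1, h2, Bool.false_eq_true, if_false, hc, List.take_succ_cons]
      exact ⟨⟨by simp [ih.1.1], ih.1.2⟩, ⟨ih.2.1, by simp [ih.2.2]⟩⟩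

-- ---- contains on the literal header dict ----
lemma pvContains_eq (l : String) :
    pvHeaders.contains l
      = ((l == "[Structured Risk Features]") || (l == "[Borrower Description]")) := by
  by_cases h1 : l = "[Structured Risk Features]"
  · subst h1; decide
  by_cases h2 : l = "[Borrower Description]"
  · subst h2; decide
  · have hc : pvHeaders.contains l = false := by
      simp only [pvHeaders, PySem.Dict.contains, PySem.Dict.insert, PySem.Dict.empty]
      simp
      exact ⟨fun e => h1 e.symm, fun e => h2 e.symm⟩
    simp [hc, h1, h2]

lemma pvZipCons (xs : List Nat) (h : xs ≠ []) :
    (0 :: xs).zip xs = (0, xs.headD 0) :: xs.zip xs.tail := by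
  cases xs with
  | nil => simp at h
  | cons a t => rfl

lemma pvHeadD_map_succ (t : List String) :
    (((pvNatCuts t ++ [t.length]).map (· + 1)).headD 0) = pvC0 t + 1 := by
  cases h : pvNatCuts t <;> simp [pvC0, h]

lemma pvShiftFold (l : String) (t : List String) (xs : List Nat)
    (st : PySem.Dict String String × List String) :
    ((xs.map (· + 1)).zip (xs.map (· + 1)).tail).foldl (pvNatSegStep (l :: t)) st
      = (xs.zip xs.tail).foldl (pvNatSegStep t) st := by
  rw [pvZipTailMap, List.foldl_map]
  have hfun : (fun st p => pvNatSegStep (l :: t) st (Prod.map (· + 1) (· + 1) p))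
      = pvNatSegStep t := by
    funext st p
    obtain ⟨a, b⟩ := p
    exact pvNatSegStep_shift l t st a b
  rw [hfun]

-- ---- B-side main lemma ----
lemma pvLB (ls : List String) (d : PySem.Dict String String) (dl : List String) :
    pvNatFold ls (d, dl) =
      ((pvSfull none ls).1.foldl pvB_step d, dl ++ (pvSfull none ls).2.1) := by
  induction ls generalizing d dl with
  | nil => simp [pvNatFold, pvNatCuts, pvSfull]
  | cons l t ih =>
    by_cases h1 : l == "[Structured Risk Features]"
    · have hl : l = "[Structured Risk Features]" := by simpa using h1
      have hhdr : pvIsHdr l = true := by simp [pvIsHdr, pvContains_eq, h1]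
      have hcuts : pvNatCuts (l :: t) ++ [(l :: t).length]
          = 0 :: (pvNatCuts t ++ [t.length]).map (· + 1) := by
        simp [pvNatCuts, hhdr]
      unfold pvNatFold
      rw [hcuts, List.tail_cons, pvZipCons _ (by simp), List.foldl_cons]
      have hstep : pvNatSegStep (l :: t) (d, dl)
            (0, ((pvNatCuts t ++ [t.length]).map (· + 1)).headD 0)
          = ((t.take (pvC0 t)).foldl pvB_step d, dl) := by
        rw [pvHeadD_map_succ]
        subst hl
        simp [pvNatSegStep,
          show (pvHeaders.get? "[Structured Risk Features]").getD false = true from by decide]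
      rw [hstep, pvShiftFold]
      have : (((pvNatCuts t ++ [t.length]).zip (pvNatCuts t ++ [t.length]).tail).foldl
            (pvNatSegStep t) ((t.take (pvC0 t)).foldl pvB_step d, dl))
          = pvNatFold t ((t.take (pvC0 t)).foldl pvB_step d, dl) := rfl
      rw [this, ih]
      have hS := (pvSfull_open t).1
      simp [pvSfull, h1, hS.1, hS.2, List.foldl_append]
    by_cases h2 : l == "[Borrower Description]"
    · have hl : l = "[Borrower Description]" := by simpa using h2
      have hhdr : pvIsHdr l = true := by simp [pvIsHdr, pvContains_eq, h2]
      have hcuts : pvNatCuts (l :: t) ++ [(l :: t).length]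
          = 0 :: (pvNatCuts t ++ [t.length]).map (· + 1) := by
        simp [pvNatCuts, hhdr]
      unfold pvNatFold
      rw [hcuts, List.tail_cons, pvZipCons _ (by simp), List.foldl_cons]
      have hstep : pvNatSegStep (l :: t) (d, dl)
            (0, ((pvNatCuts t ++ [t.length]).map (· + 1)).headD 0)
          = (d, dl ++ t.take (pvC0 t)) := by
        rw [pvHeadD_map_succ]
        subst hl
        simp [pvNatSegStep,
          show (pvHeaders.get? "[Borrower Description]").getD false = false from by decide]
      rw [hstep, pvShiftFold]
      have : (((pvNatCuts t ++ [t.length]).zip (pvNatCuts t ++ [t.length]).tail).foldl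
            (pvNatSegStep t) (d, dl ++ t.take (pvC0 t)))
          = pvNatFold t (d, dl ++ t.take (pvC0 t)) := rfl
      rw [this, ih]
      have hS := (pvSfull_open t).2
      simp [pvSfull, h1, h2, hS.1, hS.2]
    · have hhdr : pvIsHdr l = false := by simp [pvIsHdr, pvContains_eq, h1, h2]
      have hcuts : pvNatCuts (l :: t) ++ [(l :: t).length]
          = (pvNatCuts t ++ [t.length]).map (· + 1) := by
        simp [pvNatCuts, hhdr]
      unfold pvNatFold
      rw [hcuts, pvShiftFold]
      have : ((pvNatCuts t ++ [t.length]).zip (pvNatCuts t ++ [t.length]).tail).foldl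
            (pvNatSegStep t) (d, dl) = pvNatFold t (d, dl) := rfl
      rw [this, ih]
      simp [pvSfull, h1, h2]

-- B's port computes the Nat-level fold
lemma pvAltFold (ls : List String) :
    ((((PySem.List.enumerate ls).filter (fun p => pvHeaders.contains p.2)).map (fun p => p.1)
        ++ [(ls.length : Int)]).zip
      ((((PySem.List.enumerate ls).filter (fun p => pvHeaders.contains p.2)).map (fun p => p.1)
        ++ [(ls.length : Int)]).tail)).foldl (pvSegStep ls) (PySem.Dict.empty, [])
      = pvNatFold ls (PySem.Dict.empty, []) := by
  have hcuts : ((PySem.List.enumerate ls).filter (fun p => pvHeaders.contains p.2)).map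
        (fun p => p.1) ++ [(ls.length : Int)]
      = (pvNatCuts ls ++ [ls.length]).map (fun (n : Nat) => (n : Int)) := by
    have h := pvEnumCuts ls 0
    simp only [add_zero] at h
    simp [h]
  rw [hcuts, pvZipTailMap, List.foldl_map]
  have hfun : (fun (st : PySem.Dict String String × List String) p =>
        pvSegStep ls st (Prod.map (fun (n : Nat) => (n : Int)) (fun (n : Nat) => (n : Int)) p))
      = pvNatSegStep ls := by
    funext st p
    obtain ⟨a, b⟩ := p
    exact pvSegStep_natCast ls st a b
  rw [hfun]
  rfl

-- ===== VERDICT (by name: the statement is the Claim_ definition above) =====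
theorem parse_bert_input_py_spec : Claim_equal_parse_bert_input_py := by
  intro s _
  show parse_bert_input_py s = parse_bert_input_py_alt s
  have hA := pvLA (PySem.Str.splitlines s) PySem.Dict.empty [] none
  have hB := pvAltFold ((PySem.Str.splitlines s).map PySem.Str.strip)
  have hL := pvLB ((PySem.Str.splitlines s).map PySem.Str.strip) PySem.Dict.empty []
  unfold parse_bert_input_py parse_bert_input_py_alt
  simp only [show ((PySem.Dict.empty : PySem.Dict String String), ([] : List String),
      false, false) = (PySem.Dict.empty, [], pvEnc none) from rfl, hA, hB, hL]
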